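-- pv_equiv track=rewrite | github.com/wangyouj/AirTestPlatform | AirTestPlatform/business/AirBooking.py | getPostIdList
-- ===== SOURCE A (Python) =====
-- def getPostIdList(idLists):
--     idsList=[]
--     relationIdlist=[]
--     if len(idLists)>0:
--         for sendApplyId in idLists:
--             idsList.append(sendApplyId['id'])
--             relationIdlist.append(sendApplyId['relationId'])
--     n = 5  # 每5条数据单独一次申请
--     idsList=[idsList[i:i + n] for i in range(0, len(idsList), n)]
--     relationIdlist=[relationIdlist[i:i + n] for i in range(0, len(relationIdlist), n)]
--     return idsList,relationIdlist
-- ===== SOURCE B (Python) =====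
-- def getPostIdList(idLists):
--     # One pass over 5-element blocks: extraction and chunking fused,
--     # instead of A's extract-all-then-reslice comprehensions.
--     idsList = []
--     relationIdlist = []
--     rest = idLists
--     while rest:
--         group, rest = rest[:5], rest[5:]
--         idsList.append([d['id'] for d in group])
--         relationIdlist.append([d['relationId'] for d in group])
--     return idsList, relationIdlist
-- ===== Notes on version B (the rewrite author's own statement) =====
-- stated objective: alternative
-- what changed: B fuses extraction and chunking into a single traversal over 5-element blocks of the input (take/drop recursion), instead of A's build-two-flat-lists pass followed by range/slice re-chunking comprehensions.
import Mathlib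
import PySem

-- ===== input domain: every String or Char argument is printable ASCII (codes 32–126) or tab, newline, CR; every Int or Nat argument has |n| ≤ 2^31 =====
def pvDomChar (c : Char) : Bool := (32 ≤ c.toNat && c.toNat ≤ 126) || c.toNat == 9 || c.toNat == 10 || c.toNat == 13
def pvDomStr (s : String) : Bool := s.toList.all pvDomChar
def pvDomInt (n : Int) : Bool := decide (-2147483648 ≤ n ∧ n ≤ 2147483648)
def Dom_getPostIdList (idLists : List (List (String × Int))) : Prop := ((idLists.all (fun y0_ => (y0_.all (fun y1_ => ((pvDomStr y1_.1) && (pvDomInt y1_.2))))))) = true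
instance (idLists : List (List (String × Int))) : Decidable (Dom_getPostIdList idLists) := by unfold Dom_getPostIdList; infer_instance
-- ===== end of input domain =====

-- B fuses extraction and 5-chunking into one take/drop recursion over the input; objective: alternative decomposition (same cost).


-- shared helper: sendApplyId['id'] / sendApplyId['relationId'] (first-match lookup; Pre_ guarantees the key is present)
def getId (d : List (String × Int)) : Int := ((PySem.Dict.mk d).get? "id").getD 0
def getRel (d : List (String × Int)) : Int := ((PySem.Dict.mk d).get? "relationId").getD 0

-- ===== PORT A =====
def getPostIdList (idLists : List (List (String × Int))) : List (List Int) × List (List Int) :=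
  let idsList : List Int := []
  let relationIdlist : List Int := []
  let (idsList, relationIdlist) :=
    if idLists.length > 0 then
      idLists.foldl (fun (p : List Int × List Int) sendApplyId =>
        (p.1 ++ [getId sendApplyId], p.2 ++ [getRel sendApplyId])) (idsList, relationIdlist)
    else (idsList, relationIdlist)
  let n : Int := 5
  let idsList2 := (PySem.List.pyRange 0 (idsList.length : Int) n).map
    (fun i => PySem.List.slice idsList (some i) (some (i + n)))
  let relationIdlist2 := (PySem.List.pyRange 0 (relationIdlist.length : Int) n).map
    (fun i => PySem.List.slice relationIdlist (some i) (some (i + n)))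
  (idsList2, relationIdlist2)

-- ===== PORT B =====
def getPostIdList_alt (idLists : List (List (String × Int))) : List (List Int) × List (List Int) :=
  match idLists with
  | [] => ([], [])
  | x :: xs =>
    let group := (x :: xs).take 5
    let rest := xs.drop 4          -- = (x :: xs).drop 5
    let p := getPostIdList_alt rest
    (group.map getId :: p.1, group.map getRel :: p.2)
termination_by idLists.length
decreasing_by simp

-- ===== PRECONDITION & SPEC =====
-- Pre_ excludes exactly the inputs where some dict lacks key 'id' or 'relationId', on which Python A raises KeyError.
def Pre_getPostIdList (idLists : List (List (String × Int))) : Prop :=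
  (idLists.all (fun d => d.any (fun p => p.1 == "id") && d.any (fun p => p.1 == "relationId"))) = true
instance (idLists : List (List (String × Int))) : Decidable (Pre_getPostIdList idLists) := by unfold Pre_getPostIdList; infer_instance
def pvWitness_getPostIdList : (List (List (String × Int))) := [[("id", 1), ("relationId", 2)], [("relationId", 4), ("id", 3)]]

def Spec_getPostIdList (idLists : List (List (String × Int))) (out : List (List Int) × List (List Int)) : Prop := out = getPostIdList_alt idLists
instance (idLists : List (List (String × Int))) (out : List (List Int) × List (List Int)) : Decidable (Spec_getPostIdList idLists out) := by unfold Spec_getPostIdList; infer_instance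

-- ===== CLAIM (what is proved, stated in full; the proofs are below) =====
def Claim_equal_getPostIdList : Prop := ∀ (idLists : List (List (String × Int))), Dom_getPostIdList idLists → Pre_getPostIdList idLists → Spec_getPostIdList idLists (getPostIdList idLists)

-- ===== LEMMAS AND PROOFS =====

-- proof-side chunker: the common normal form of A's slice comprehension and B's fused recursion
def chunk5 {α : Type} : List α → List (List α)
  | [] => []
  | x :: xs => (x :: xs).take 5 :: chunk5 (xs.drop 4)
termination_by xs => xs.length
decreasing_by simp

-- A's flat-extraction fold produces the two mapped lists
theorem foldA_eq (L : List (List (String × Int))) (a b : List Int) :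
    L.foldl (fun (p : List Int × List Int) d => (p.1 ++ [getId d], p.2 ++ [getRel d])) (a, b)
      = (a ++ L.map getId, b ++ L.map getRel) := by
  induction L generalizing a b with
  | nil => simp
  | cons x xs ih => simp [List.foldl_cons, ih]

-- range(0, n, 5) peels its head when n > 0
theorem pyRange_five_cons (n : Int) (h : 0 < n) :
    PySem.List.pyRange 0 n 5 = 0 :: (PySem.List.pyRange 0 (n - 5) 5).map (· + 5) := by
  rw [PySem.List.pyRange_of_pos 0 n (by norm_num), PySem.List.pyRange_of_pos 0 (n - 5) (by norm_num)]
  by_cases h5 : 5 < n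
  · have hc : ((n - 0 + 5 - 1) / 5).toNat = ((n - 5 - 0 + 5 - 1) / 5).toNat + 1 := by omega
    simp only [if_pos h, if_pos (by omega : (0:Int) < n - 5), hc, List.range_succ_eq_map,
      List.map_cons, List.map_map]
    congr 1
  · have hc : ((n - 0 + 5 - 1) / 5).toNat = 1 := by omega
    simp only [if_pos h, if_neg (by omega : ¬ (0:Int) < n - 5), hc]
    simp [List.range_succ]

-- A's slice comprehension equals the recursive 5-chunker
theorem chunkA_eq (xs : List Int) :
    (PySem.List.pyRange 0 (xs.length : Int) 5).map
      (fun i => PySem.List.slice xs (some i) (some (i + 5))) = chunk5 xs := by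
  match xs with
  | [] =>
    rw [show (([] : List Int).length : Int) = 0 from rfl]
    rw [PySem.List.pyRange_of_pos 0 0 (by norm_num)]
    simp [chunk5]
  | x :: xs =>
    have ih := chunkA_eq (xs.drop 4)
    have hn : (0:Int) < ((x :: xs).length : Int) := by simp
    rw [pyRange_five_cons _ hn]
    simp only [List.map_cons, List.map_map]
    have h0 : PySem.List.slice (x :: xs) (some 0) (some (0 + 5)) = (x :: xs).take 5 := by
      rw [show ((0:Int) + 5) = ((5:Nat) : Int) by norm_num,
          show (0:Int) = ((0:Nat) : Int) by norm_num,
          PySem.List.slice_natCast]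
      simp
    rw [h0]
    rw [chunk5]
    congr 1
    have hlen : PySem.List.pyRange 0 (((x :: xs).length : Int) - 5) 5
        = PySem.List.pyRange 0 (((xs.drop 4).length : Int)) 5 := by
      by_cases h4 : 4 ≤ xs.length
      · have hb : (((xs.drop 4).length : Nat) : Int) = ((x :: xs).length : Int) - 5 := by
          simp [List.length_drop]
          omega
        rw [← hb]
      · have e1 : PySem.List.pyRange 0 (((x :: xs).length : Int) - 5) 5 = [] := by
          rw [PySem.List.pyRange_of_pos _ _ (by norm_num)]
          simp
          exact fun h5 => absurd h5 (by omega)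
        have e2 : PySem.List.pyRange 0 (((xs.drop 4).length : Nat) : Int) 5 = [] := by
          have hz : (xs.drop 4).length = 0 := by simp; omega
          rw [hz, PySem.List.pyRange_of_pos _ _ (by norm_num)]
          simp
        rw [e1, e2]
    rw [hlen, ← ih]
    apply List.map_congr_left
    intro i hi
    have hi0 : 0 ≤ i := by
      have := (PySem.List.mem_pyRange_iff_of_pos (by norm_num : (0:Int) < 5) i).1 hi
      omega
    simp only [Function.comp_apply]
    rw [PySem.List.slice_toNat _ (by omega) (by omega),
        PySem.List.slice_toNat _ (by omega) (by omega)]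
    have e1 : (i + 5 + 5).toNat - (i + 5).toNat = 5 := by omega
    have e2 : (i + 5).toNat - i.toNat = 5 := by omega
    have e3 : (i + 5).toNat = i.toNat + 5 := by omega
    rw [e1, e2, e3]
    have : (x :: xs).drop (i.toNat + 5) = (xs.drop 4).drop i.toNat := by
      rw [List.drop_drop, show i.toNat + 5 = (4 + i.toNat) + 1 from by omega,
          List.drop_succ_cons]
    rw [this]
termination_by xs.length
decreasing_by simp

-- B's fused recursion splits into the two chunked maps
theorem alt_eq (L : List (List (String × Int))) :
    getPostIdList_alt L = (chunk5 (L.map getId), chunk5 (L.map getRel)) := by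
  match L with
  | [] => simp [getPostIdList_alt, chunk5]
  | x :: xs =>
    have ih := alt_eq (xs.drop 4)
    rw [getPostIdList_alt]
    simp only [List.map_cons, chunk5]
    simp [ih, List.map_take, List.map_drop]
termination_by L.length
decreasing_by simp

-- ===== VERDICT (by name: the statement is the Claim_ definition above) =====
theorem getPostIdList_spec : Claim_equal_getPostIdList := by
  intro L _ _
  unfold Spec_getPostIdList
  rw [alt_eq]
  by_cases hL : L.length > 0
  · simp only [getPostIdList, if_pos hL, foldA_eq, List.nil_append]
    exact congrArg₂ Prod.mk (chunkA_eq _) (chunkA_eq _)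
  · have hLnil : L = [] := by cases L <;> simp_all
    subst hLnil
    simp only [getPostIdList, List.length_nil, gt_iff_lt, Nat.lt_irrefl, if_false, List.foldl_nil]
    exact congrArg₂ Prod.mk (chunkA_eq []) (chunkA_eq [])
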